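-- pv_equiv track=rewrite | github.com/royadityak94/InterviewPrep | Case_Study/Python/tic_tac_toe_configuration_checker.py | return_flattened_tuples_player_wise
-- ===== SOURCE A (Python) =====
-- import itertools
--
-- def return_flattened_tuples_player_wise(configuration):
--     flatten = itertools.chain.from_iterable
--     player1, player2 = [], []
--     for key in configuration.keys():
--         val1, val2 = configuration.get(key)
--         player1.append(val1)
--         player2.append(val2)
--     return player1, player2
-- ===== SOURCE B (Python) =====
-- def return_flattened_tuples_player_wise(configuration):
--     pairs = [(a, b) for (a, b) in configuration.values()]
--     if not pairs:
--         return [], []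
--     p1, p2 = zip(*pairs)
--     return list(p1), list(p2)
-- ===== Notes on version B (the rewrite author's own statement) =====
-- stated objective: idiomatic
-- what changed: Replaces the key-lookup loop appending to two accumulators with a column-wise transpose of the dict's values via zip(*pairs).
import Mathlib
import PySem

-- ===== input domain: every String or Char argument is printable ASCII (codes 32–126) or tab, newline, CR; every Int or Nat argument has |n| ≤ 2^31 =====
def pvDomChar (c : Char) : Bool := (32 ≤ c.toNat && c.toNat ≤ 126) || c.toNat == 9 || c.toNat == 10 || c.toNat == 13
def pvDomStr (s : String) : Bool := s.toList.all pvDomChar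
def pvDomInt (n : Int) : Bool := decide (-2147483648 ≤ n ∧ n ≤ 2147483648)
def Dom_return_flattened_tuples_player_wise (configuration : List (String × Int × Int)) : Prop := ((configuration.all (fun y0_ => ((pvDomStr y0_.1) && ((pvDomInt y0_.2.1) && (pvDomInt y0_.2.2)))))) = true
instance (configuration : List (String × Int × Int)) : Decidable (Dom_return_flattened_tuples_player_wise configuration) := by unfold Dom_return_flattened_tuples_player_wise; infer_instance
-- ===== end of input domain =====

-- B replaces A's key-lookup loop with two accumulators by a column-wise transpose of the
-- dict's values (idiomatic; same cost).

-- ===== PORT A =====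
-- for key in configuration.keys(): val1, val2 = configuration.get(key); append to each list.
-- The `.getD ((0 : Int), (0 : Int))` default never fires: every key iterated is in the dict.
def return_flattened_tuples_player_wise (configuration : List (String × Int × Int)) : List Int × List Int :=
  let d := PySem.Dict.ofList configuration
  (d.keys).foldl
    (fun acc k =>
      let v := (d.get? k).getD ((0 : Int), (0 : Int))
      (acc.1 ++ [v.1], acc.2 ++ [v.2]))
    ([], [])

-- ===== PORT B =====
-- pairs = values; if empty return ([], []); else transpose column-wise.
def return_flattened_tuples_player_wise_alt (configuration : List (String × Int × Int)) : List Int × List Int :=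
  let pairs := (PySem.Dict.ofList configuration).values
  match pairs with
  | [] => ([], [])
  | _ => (pairs.map Prod.fst, pairs.map Prod.snd)

-- ===== PRECONDITION & SPEC =====
def Spec_return_flattened_tuples_player_wise (configuration : List (String × Int × Int)) (out : List Int × List Int) : Prop := out = return_flattened_tuples_player_wise_alt configuration
instance (configuration : List (String × Int × Int)) (out : List Int × List Int) : Decidable (Spec_return_flattened_tuples_player_wise configuration out) := by unfold Spec_return_flattened_tuples_player_wise; infer_instance

-- ===== CLAIM (what is proved, stated in full; the proofs are below) =====
def Claim_equal_return_flattened_tuples_player_wise : Prop := ∀ (configuration : List (String × Int × Int)), Dom_return_flattened_tuples_player_wise configuration → Spec_return_flattened_tuples_player_wise configuration (return_flattened_tuples_player_wise configuration)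

-- ===== LEMMAS AND PROOFS =====
-- A's accumulator loop over any list of pairs produces the two column projections.
theorem foldl_two_append (l : List (Int × Int)) (a b : List Int) :
    l.foldl (fun acc v => (acc.1 ++ [v.1], acc.2 ++ [v.2])) (a, b)
      = (a ++ l.map Prod.fst, b ++ l.map Prod.snd) := by
  induction l generalizing a b with
  | nil => simp
  | cons x xs ih => simp [List.foldl_cons, ih]

theorem return_flattened_tuples_player_wise_spec : Claim_equal_return_flattened_tuples_player_wise := by
  intro configuration _
  show return_flattened_tuples_player_wise configuration
      = return_flattened_tuples_player_wise_alt configuration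
  unfold return_flattened_tuples_player_wise return_flattened_tuples_player_wise_alt
  set d := PySem.Dict.ofList configuration with hd
  have hnd : d.keys.Nodup := PySem.Dict.nodup_keys_ofList configuration
  have hv : d.values = d.keys.map (fun k => d.getD k ((0 : Int), (0 : Int))) :=
    PySem.Dict.values_eq_map_keys d hnd ((0 : Int), (0 : Int))
  have hloop :
      (d.keys).foldl
        (fun acc k =>
          let v := (d.get? k).getD ((0 : Int), (0 : Int))
          (acc.1 ++ [v.1], acc.2 ++ [v.2]))
        ([], []) = (d.values.map Prod.fst, d.values.map Prod.snd) := by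
    have := foldl_two_append
      (d.keys.map (fun k => (d.get? k).getD ((0 : Int), (0 : Int)))) [] []
    simpa [List.foldl_map, hv, PySem.Dict.getD_eq_get?_getD, List.map_map,
      Function.comp] using this
  rw [hloop]
  cases hvals : d.values with
  | nil => simp
  | cons p ps => simp
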